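-- pv_equiv track=rewrite | github.com/aitoolkit/hackerrank_interview_preparation_kit_solutions | topics/miscellaneous/friend_circle_queries.py | maxCircle
-- ===== SOURCE A (Python) =====
-- class UnionFind:
--     def __init__(self, n):
--         self.parent: list[int] = list(range(n))
--         self.rank: list[int] = [0] * n
--         self.size: list[int] = [1] * n
--         self.max_size: int = 1
--
--     def find(self, u: int) -> int:
--         if self.parent[u] != u:
--             self.parent[u] = self.find(self.parent[u])
--         return self.parent[u]
--
--     def union(self, u: int, v: int) -> None:
--         root_u = self.find(u)
--         root_v = self.find(v)
--
--         if root_u != root_v: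
--             if self.rank[root_u] > self.rank[root_v]:
--                 self.parent[root_v] = root_u
--                 self.size[root_u] += self.size[root_v]
--                 self.max_size = max(self.max_size, self.size[root_u])
--             elif self.rank[root_u] < self.rank[root_v]:
--                 self.parent[root_u] = root_v
--                 self.size[root_v] += self.size[root_u]
--                 self.max_size = max(self.max_size, self.size[root_v])
--             else:
--                 self.parent[root_v] = root_u
--                 self.rank[root_u] += 1
--                 self.size[root_u] += self.size[root_v]
--                 self.max_size = max(self.max_size, self.size[root_u])
--
-- def maxCircle(queries):
--     people_map = {}
--     next_id = 0
--     max_circle_sizes = []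
--
--     for a, b in queries:
--         if a not in people_map:
--             people_map[a] = next_id
--             next_id += 1
--         if b not in people_map:
--             people_map[b] = next_id
--             next_id += 1
--
--     uf = UnionFind(next_id) # type: ignore
--
--     for a, b in queries:
--         uf.union(people_map[a], people_map[b])
--         max_circle_sizes.append(uf.max_size)
--
--     return max_circle_sizes
-- ===== SOURCE B (Python) =====
-- def maxCircle(queries):
--     # Direct component merging ("small-to-large"): no union-find at all.
--     # comp maps every label straight to its component's representative (no
--     # parent chains, no find, no path compression, no ranks); members maps a
--     # representative to the list of labels in its component.  A union query
--     # relabels every member of the smaller component in one sweep, which keeps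
--     # comp a flat map; each label is relabelled O(log q) times in total.
--     comp = {}
--     members = {}
--     best = 1
--     result = []
--     for a, b in queries:
--         for x in (a, b):
--             if x not in comp:
--                 comp[x] = x
--                 members[x] = [x]
--         ra, rb = comp[a], comp[b]
--         if ra != rb:
--             if len(members[ra]) < len(members[rb]):
--                 ra, rb = rb, ra
--             small = members.pop(rb)
--             for x in small:
--                 comp[x] = ra
--             big = members[ra]
--             big.extend(small)
--             if len(big) > best:
--                 best = len(big)
--         result.append(best)
--     return result
-- ===== Notes on version B (the rewrite author's own statement) =====
-- stated objective: alternative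
-- what changed: B abandons union-find entirely: instead of parent chains with recursive find, path compression and union by rank over remapped integer ids (built by a separate first pass), it keeps a flat label-to-representative map plus explicit member lists per component and merges by relabelling the smaller component's members in one sweep (small-to-large); the max size sequence is identical because it depends only on the partition, not on the merge bookkeeping.
import Mathlib
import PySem

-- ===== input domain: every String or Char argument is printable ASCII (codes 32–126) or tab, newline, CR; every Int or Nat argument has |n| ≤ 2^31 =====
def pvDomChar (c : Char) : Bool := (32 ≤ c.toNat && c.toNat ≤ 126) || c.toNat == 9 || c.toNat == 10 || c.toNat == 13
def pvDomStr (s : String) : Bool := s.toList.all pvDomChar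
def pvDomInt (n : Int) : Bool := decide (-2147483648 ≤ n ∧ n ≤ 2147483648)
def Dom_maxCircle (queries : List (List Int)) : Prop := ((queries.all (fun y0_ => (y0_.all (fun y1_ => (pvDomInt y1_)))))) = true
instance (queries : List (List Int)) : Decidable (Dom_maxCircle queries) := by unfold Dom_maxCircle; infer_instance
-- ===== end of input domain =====

-- B replaces A's union-find (id-remapping pre-pass, parent arrays, recursive find with
-- path compression, union by rank) by direct small-to-large component merging on the
-- original labels: a flat label→representative map plus explicit member lists
-- (alternative algorithm; the max-size sequence depends only on the partition).

-- ===== PORT A =====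
-- in-range read/write of the parent/rank/size arrays (A only ever indexes with valid ids)
def pvGet (l : List Int) (i : Int) : Int := PySem.List.pyGetD l i 0
def pvSet (l : List Int) (i v : Int) : List Int :=
  if 0 ≤ i then l.set i.toNat v else l

-- self.find(u): recursive find with path compression; fuel is a totality guard
-- (queries.length + 1 always suffices, proved below), never reached on A's runs
def findA : Nat → List Int → Int → List Int × Int
  | 0, parent, u => (parent, u)
  | fuel+1, parent, u =>
    if pvGet parent u ≠ u then
      let pr := findA fuel parent (pvGet parent u)
      let p2 := pvSet pr.1 u pr.2
      (p2, pvGet p2 u)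
    else (parent, pvGet parent u)

structure UFA where
  parent : List Int
  rank : List Int
  size : List Int
  maxSize : Int
deriving Repr, DecidableEq

-- self.union(u, v)
def unionA (fuel : Nat) (uf : UFA) (u v : Int) : UFA :=
  let f1 := findA fuel uf.parent u
  let f2 := findA fuel f1.1 v
  let ru := f1.2
  let rv := f2.2
  if ru ≠ rv then
    if pvGet uf.rank ru > pvGet uf.rank rv then
      let size' := pvSet uf.size ru (pvGet uf.size ru + pvGet uf.size rv)
      { parent := pvSet f2.1 rv ru, rank := uf.rank, size := size',
        maxSize := max uf.maxSize (pvGet size' ru) }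
    else if pvGet uf.rank ru < pvGet uf.rank rv then
      let size' := pvSet uf.size rv (pvGet uf.size rv + pvGet uf.size ru)
      { parent := pvSet f2.1 ru rv, rank := uf.rank, size := size',
        maxSize := max uf.maxSize (pvGet size' rv) }
    else
      let size' := pvSet uf.size ru (pvGet uf.size ru + pvGet uf.size rv)
      { parent := pvSet f2.1 rv ru, rank := pvSet uf.rank ru (pvGet uf.rank ru + 1),
        size := size', maxSize := max uf.maxSize (pvGet size' ru) }
  else { uf with parent := f2.1 }

-- first pass: people_map and next_id
def buildA (queries : List (List Int)) : PySem.Dict Int Int × Int :=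
  queries.foldl (fun (st : PySem.Dict Int Int × Int) q =>
    match q with
    | [a, b] =>
      let st1 := if st.1.contains a then st else (st.1.insert a st.2, st.2 + 1)
      if st1.1.contains b then st1 else (st1.1.insert b st1.2, st1.2 + 1)
    | _ => st) (PySem.Dict.empty, 0)

def maxCircle (queries : List (List Int)) : List Int :=
  let pm := (buildA queries).1
  let n := (buildA queries).2
  let uf0 : UFA := ⟨PySem.List.pyRange 0 n 1, List.replicate n.toNat 0, List.replicate n.toNat 1, 1⟩
  (queries.foldl (fun (st : UFA × List Int) q =>
    match q with
    | [a, b] =>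
      let uf' := unionA (queries.length + 1) st.1 (pm.getD a 0) (pm.getD b 0)
      (uf', st.2 ++ [uf'.maxSize])
    | _ => st) (uf0, [])).2

-- ===== PORT B =====
structure UFB where
  comp : PySem.Dict Int Int
  members : PySem.Dict Int (List Int)
  best : Int
deriving Repr, DecidableEq

-- the 'for x in (a, b): if x not in comp: …' registration, for one label
def registerB (st : UFB) (x : Int) : UFB :=
  if st.comp.contains x then st
  else { st with comp := st.comp.insert x x, members := st.members.insert x [x] }

-- one query: look up the two representatives; if distinct, relabel the smaller
-- component's members and append its list to the larger one
-- ('members.pop(rb)' is ported as getD-then-erase: the key is always present when reached)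
def stepB (st0 : UFB) (a b : Int) : UFB :=
  let st1 := registerB (registerB st0 a) b
  let ra0 := st1.comp.getD a 0
  let rb0 := st1.comp.getD b 0
  if ra0 ≠ rb0 then
    let la := st1.members.getD ra0 []
    let lb := st1.members.getD rb0 []
    let ra := if la.length < lb.length then rb0 else ra0
    let rb := if la.length < lb.length then ra0 else rb0
    let small := st1.members.getD rb []
    let members1 := st1.members.erase rb
    let comp' := small.foldl (fun d x => d.insert x ra) st1.comp
    let big := members1.getD ra [] ++ small
    { comp := comp', members := members1.insert ra big,
      best := if (big.length : Int) > st1.best then (big.length : Int) else st1.best }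
  else st1

def maxCircle_alt (queries : List (List Int)) : List Int :=
  (queries.foldl (fun (st : UFB × List Int) q =>
    match q with
    | [a, b] =>
      let st' := stepB st.1 a b
      (st', st.2 ++ [st'.best])
    | _ => st) (⟨PySem.Dict.empty, PySem.Dict.empty, 1⟩, [])).2

-- ===== PRECONDITION & SPEC =====
-- Pre_ excludes exactly the inputs on which A raises: a query that is not a pair
-- makes 'for a, b in queries' raise ValueError (B raises there too).
def Pre_maxCircle (queries : List (List Int)) : Prop := ∀ q ∈ queries, q.length = 2
instance (queries : List (List Int)) : Decidable (Pre_maxCircle queries) := by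
  unfold Pre_maxCircle; infer_instance

def pvWitness_maxCircle : List (List Int) := [[1, 2], [3, 4], [2, 3], [5, 5]]

def Spec_maxCircle (queries : List (List Int)) (out : List Int) : Prop := out = maxCircle_alt queries
instance (queries : List (List Int)) (out : List Int) : Decidable (Spec_maxCircle queries out) := by
  unfold Spec_maxCircle; infer_instance

-- ===== CLAIM (what is proved, stated in full; the proofs are below) =====
def Claim_equal_maxCircle : Prop :=
  ∀ (queries : List (List Int)), Dom_maxCircle queries → Pre_maxCircle queries →
    Spec_maxCircle queries (maxCircle queries)

-- ===== LEMMAS AND PROOFS =====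

-- ---------- generic fuel-based chain / root machinery ----------

-- the nodes visited by a parent-walk from u (u first, root last)
def chainF : Nat → (Int → Int) → Int → List Int
  | 0, _, u => [u]
  | fuel+1, f, u => if f u = u then [u] else u :: chainF fuel f (f u)

-- the value the walk ends at
def rootF : Nat → (Int → Int) → Int → Int
  | 0, _, u => u
  | fuel+1, f, u => if f u = u then u else rootF fuel f (f u)

-- active ids
def pvUFS (m : Nat) (x : Int) : Prop := 0 ≤ x ∧ x < (m : Int)

lemma chainF_mem (fuel : Nat) (f _rk : Int → Int) (m : Nat)
    (hclos : ∀ x, pvUFS m x → pvUFS m (f x)) (u : Int) (hu : pvUFS m u) :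
    ∀ y ∈ chainF fuel f u, pvUFS m y := by
  induction fuel generalizing u with
  | zero => intro y hy; simp [chainF] at hy; simpa [hy]
  | succ n ih =>
    intro y hy
    by_cases h : f u = u
    · simp [chainF, h] at hy; simpa [hy]
    · simp only [chainF, if_neg h, List.mem_cons] at hy
      rcases hy with rfl | hy
      · exact hu
      · exact ih (f u) (hclos u hu) y hy

lemma chainF_rank_le (fuel : Nat) (f rk : Int → Int) (m : Nat)
    (hclos : ∀ x, pvUFS m x → pvUFS m (f x))
    (hri : ∀ x, pvUFS m x → f x ≠ x → rk x < rk (f x)) (u : Int) (hu : pvUFS m u) :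
    ∀ y ∈ chainF fuel f u, rk u ≤ rk y := by
  induction fuel generalizing u with
  | zero => intro y hy; simp [chainF] at hy; simp [hy]
  | succ n ih =>
    intro y hy
    by_cases h : f u = u
    · simp [chainF, h] at hy; simp [hy]
    · simp only [chainF, if_neg h, List.mem_cons] at hy
      rcases hy with rfl | hy
      · exact le_refl _
      · exact le_trans (le_of_lt (hri u hu h)) (ih (f u) (hclos u hu) y hy)

lemma chainF_nodup (fuel : Nat) (f rk : Int → Int) (m : Nat)
    (hclos : ∀ x, pvUFS m x → pvUFS m (f x))
    (hri : ∀ x, pvUFS m x → f x ≠ x → rk x < rk (f x)) (u : Int) (hu : pvUFS m u) :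
    (chainF fuel f u).Nodup := by
  induction fuel generalizing u with
  | zero => simp [chainF]
  | succ n ih =>
    by_cases h : f u = u
    · simp [chainF, h]
    · simp only [chainF, if_neg h, List.nodup_cons]
      refine ⟨fun hmem => ?_, ih (f u) (hclos u hu)⟩
      have := chainF_rank_le n f rk m hclos hri (f u) (hclos u hu) u hmem
      have := hri u hu h
      omega

lemma rootF_mem_chainF (fuel : Nat) (f : Int → Int) (u : Int) :
    rootF fuel f u ∈ chainF fuel f u := by
  induction fuel generalizing u with
  | zero => simp [chainF, rootF]
  | succ n ih =>
    by_cases h : f u = u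
    · simp [chainF, rootF, h]
    · simp only [chainF, rootF, if_neg h, List.mem_cons]
      exact Or.inr (ih (f u))

lemma rootF_fix (fuel : Nat) (f rk : Int → Int) (m : Nat) (B : Int)
    (hclos : ∀ x, pvUFS m x → pvUFS m (f x))
    (hri : ∀ x, pvUFS m x → f x ≠ x → rk x < rk (f x))
    (hbnd : ∀ x, pvUFS m x → rk x ≤ B)
    (u : Int) (hu : pvUFS m u) (hfuel : B - rk u < (fuel : Int)) :
    f (rootF fuel f u) = rootF fuel f u := by
  induction fuel generalizing u with
  | zero =>
    exfalso; have := hbnd u hu; simp at hfuel; omega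
  | succ n ih =>
    by_cases h : f u = u
    · simp [rootF, h]
    · simp only [rootF, if_neg h]
      refine ih (f u) (hclos u hu) ?_
      have h1 := hri u hu h
      push_cast at hfuel
      omega

lemma rank_lt_rootF (fuel : Nat) (f rk : Int → Int) (m : Nat)
    (hclos : ∀ x, pvUFS m x → pvUFS m (f x))
    (hri : ∀ x, pvUFS m x → f x ≠ x → rk x < rk (f x))
    (u : Int) (hu : pvUFS m u) :
    ∀ x ∈ chainF fuel f u, x ≠ rootF fuel f u → rk x < rk (rootF fuel f u) := by
  induction fuel generalizing u with
  | zero => intro x hx hne; simp [chainF] at hx; simp [rootF, hx] at hne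
  | succ n ih =>
    intro x hx hne
    by_cases h : f u = u
    · simp [chainF, h] at hx; simp [rootF, h, hx] at hne
    · simp only [chainF, rootF, if_neg h, List.mem_cons] at hx hne ⊢
      rcases hx with rfl | hx
      · have h1 := hri x hu h
        have h2 := chainF_rank_le n f rk m hclos hri (f x) (hclos x hu) _
          (rootF_mem_chainF n f (f x))
        omega
      · exact ih (f u) (hclos u hu) x hx hne

lemma fix_mem_chainF_eq_rootF (fuel : Nat) (f : Int → Int) (u x : Int)
    (hx : x ∈ chainF fuel f u) (hfx : f x = x) : x = rootF fuel f u := by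
  induction fuel generalizing u with
  | zero => simp [chainF] at hx; simp [rootF, hx]
  | succ n ih =>
    by_cases h : f u = u
    · simp [chainF, h] at hx; simp [rootF, h, hx]
    · simp only [chainF, if_neg h, List.mem_cons] at hx
      rcases hx with rfl | hx
      · exact absurd hfx h
      · simp only [rootF, if_neg h]
        exact ih (f u) hx

lemma rootF_of_fix (F : Nat) (f : Int → Int) (x : Int) (h : f x = x) : rootF F f x = x := by
  cases F <;> simp [rootF, h]

lemma rootF_fuel (m c : Nat) (f rk : Int → Int)
    (hclos : ∀ x, pvUFS m x → pvUFS m (f x))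
    (hri : ∀ x, pvUFS m x → f x ≠ x → rk x < rk (f x))
    (hrb : ∀ x, pvUFS m x → 0 ≤ rk x ∧ rk x ≤ (c : Int)) :
    ∀ (n₁ n₂ : Nat), n₁ ≤ n₂ → ∀ x, pvUFS m x → (c : Int) - rk x < (n₁ : Int) →
      rootF n₁ f x = rootF n₂ f x := by
  intro n₁
  induction n₁ with
  | zero =>
    intro n₂ _ x hx hlt
    exact absurd hlt (by have := hrb x hx; push_cast; omega)
  | succ n ih =>
    intro n₂ hle x hx hlt
    cases n₂ with
    | zero => omega
    | succ k =>
      by_cases h : f x = x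
      · simp [rootF, h]
      · simp only [rootF, if_neg h]
        refine ih k (by omega) (f x) (hclos x hx) ?_
        have := hri x hx h
        push_cast at hlt ⊢
        omega

lemma rootF_unroll (m c F : Nat) (f rk : Int → Int)
    (hclos : ∀ x, pvUFS m x → pvUFS m (f x))
    (hri : ∀ x, pvUFS m x → f x ≠ x → rk x < rk (f x))
    (hrb : ∀ x, pvUFS m x → 0 ≤ rk x ∧ rk x ≤ (c : Int))
    (hF : c < F) (x : Int) (hx : pvUFS m x) (hfx : f x ≠ x) :
    rootF F f x = rootF F f (f x) := by
  cases F with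
  | zero => omega
  | succ n =>
    conv_lhs => rw [rootF, if_neg hfx]
    exact rootF_fuel m c f rk hclos hri hrb n (n+1) (by omega) (f x) (hclos x hx)
      (by have h1 := hri x hx hfx
          have h2 := hrb x hx
          omega)

lemma mem_chain_root (m c F : Nat) (f rk : Int → Int)
    (hclos : ∀ x, pvUFS m x → pvUFS m (f x))
    (hri : ∀ x, pvUFS m x → f x ≠ x → rk x < rk (f x))
    (hrb : ∀ x, pvUFS m x → 0 ≤ rk x ∧ rk x ≤ (c : Int))
    (hF : c < F) :
    ∀ (n : Nat) (u : Int), pvUFS m u → (c : Int) - rk u < (n : Int) →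
      ∀ x ∈ chainF n f u, rootF F f x = rootF F f u := by
  intro n
  induction n with
  | zero =>
    intro u hu hlt
    exact absurd hlt (by have := hrb u hu; omega)
  | succ n ih =>
    intro u hu hlt x hx
    by_cases h : f u = u
    · simp [chainF, h] at hx; simp [hx]
    · simp only [chainF, if_neg h, List.mem_cons] at hx
      rcases hx with rfl | hx
      · rfl
      · rw [ih (f u) (hclos u hu)
            (by have := hri u hu h; push_cast at hlt ⊢; omega) x hx,
          ← rootF_unroll m c F f rk hclos hri hrb hF u hu h]

lemma roots_compress (m c F : Nat) (f rk g : Int → Int)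
    (hclos : ∀ x, pvUFS m x → pvUFS m (f x))
    (hri : ∀ x, pvUFS m x → f x ≠ x → rk x < rk (f x))
    (hrb : ∀ x, pvUFS m x → 0 ≤ rk x ∧ rk x ≤ (c : Int))
    (hF : c < F) (u : Int) (hu : pvUFS m u)
    (hchar : ∀ x, pvUFS m x → g x =
      if x ∈ chainF F f u ∧ x ≠ rootF F f u then rootF F f u else f x) :
    ∀ x, pvUFS m x → rootF F g x = rootF F f x := by
  have hrS : pvUFS m (rootF F f u) :=
    chainF_mem F f rk m hclos u hu _ (rootF_mem_chainF F f u)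
  have hrfix : f (rootF F f u) = rootF F f u :=
    rootF_fix F f rk m (c : Int) hclos hri (fun x hx => (hrb x hx).2) u hu
      (by have := hrb u hu; omega)
  have hgclos : ∀ x, pvUFS m x → pvUFS m (g x) := by
    intro x hx; rw [hchar x hx]; split
    · exact hrS
    · exact hclos x hx
  have hgri : ∀ x, pvUFS m x → g x ≠ x → rk x < rk (g x) := by
    intro x hx hne
    rw [hchar x hx] at hne ⊢
    by_cases hc : x ∈ chainF F f u ∧ x ≠ rootF F f u
    · rw [if_pos hc] at hne ⊢
      exact rank_lt_rootF F f rk m hclos hri u hu x hc.1 hc.2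
    · rw [if_neg hc] at hne ⊢; exact hri x hx hne
  suffices h : ∀ (n : Nat) (x : Int), pvUFS m x → (c : Int) - rk x < (n : Int) →
      rootF F g x = rootF F f x by
    intro x hx; exact h (c + 1) x hx (by have := hrb x hx; push_cast; omega)
  intro n
  induction n with
  | zero =>
    intro x hx hlt
    exact absurd hlt (by have := hrb x hx; push_cast; omega)
  | succ n ih =>
    intro x hx hlt
    by_cases hg : g x = x
    · have hf : f x = x := by
        by_cases hc : x ∈ chainF F f u ∧ x ≠ rootF F f u
        · rw [hchar x hx, if_pos hc] at hg
          exact absurd hg.symm hc.2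
        · rw [hchar x hx, if_neg hc] at hg; exact hg
      rw [rootF_of_fix F g x hg, rootF_of_fix F f x hf]
    · rw [rootF_unroll m c F g rk hgclos hgri hrb hF x hx hg,
        ih (g x) (hgclos x hx)
          (by have := hgri x hx hg; push_cast at hlt ⊢; omega)]
      by_cases hc : x ∈ chainF F f u ∧ x ≠ rootF F f u
      · have hgx : g x = rootF F f u := by rw [hchar x hx, if_pos hc]
        rw [hgx, rootF_of_fix F f _ hrfix,
          mem_chain_root m c F f rk hclos hri hrb hF F u hu
            (by have := hrb u hu; omega) x hc.1]
      · have hgx : g x = f x := by rw [hchar x hx, if_neg hc]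
        have hfx : f x ≠ x := hgx ▸ hg
        rw [hgx, ← rootF_unroll m c F f rk hclos hri hrb hF x hx hfx]

lemma roots_link (m c F : Nat) (f rk rk' g : Int → Int)
    (hclos : ∀ x, pvUFS m x → pvUFS m (f x))
    (hri : ∀ x, pvUFS m x → f x ≠ x → rk x < rk (f x))
    (hrb : ∀ x, pvUFS m x → 0 ≤ rk x ∧ rk x ≤ (c : Int))
    (hF : c + 1 < F)
    (wA lA : Int) (hwS : pvUFS m wA) (_hlS : pvUFS m lA)
    (hwfix : f wA = wA) (hlfix : f lA = lA) (hne : lA ≠ wA)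
    (hchar : ∀ x, pvUFS m x → g x = if x = lA then wA else f x)
    (hri' : ∀ x, pvUFS m x → g x ≠ x → rk' x < rk' (g x))
    (hrb' : ∀ x, pvUFS m x → 0 ≤ rk' x ∧ rk' x ≤ (c : Int) + 1) :
    ∀ x, pvUFS m x → rootF F g x = if rootF F f x = lA then wA else rootF F f x := by
  have hgclos : ∀ x, pvUFS m x → pvUFS m (g x) := by
    intro x hx; rw [hchar x hx]; split
    · exact hwS
    · exact hclos x hx
  have hrb'' : ∀ x, pvUFS m x → 0 ≤ rk' x ∧ rk' x ≤ ((c + 1 : Nat) : Int) := by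
    intro x hx; have := hrb' x hx; push_cast; omega
  have hgw : g wA = wA := by
    rw [hchar wA hwS, if_neg (fun hh => hne hh.symm)]
    exact hwfix
  suffices h : ∀ (n : Nat) (x : Int), pvUFS m x → (c : Int) + 1 - rk' x < (n : Int) →
      rootF F g x = if rootF F f x = lA then wA else rootF F f x by
    intro x hx; exact h (c + 2) x hx (by have := hrb' x hx; push_cast; omega)
  intro n
  induction n with
  | zero =>
    intro x hx hlt
    exact absurd hlt (by have := hrb' x hx; push_cast; omega)
  | succ n ih =>
    intro x hx hlt
    by_cases hxl : x = lA
    · have hgl : g x = wA := by rw [hchar x hx, if_pos hxl]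
      have hgne : g x ≠ x := by rw [hgl, hxl]; exact fun hh => hne hh.symm
      rw [rootF_unroll m (c+1) F g rk' hgclos hri' hrb'' hF x hx hgne, hgl,
        rootF_of_fix F g wA hgw, hxl, rootF_of_fix F f lA hlfix, if_pos rfl]
    · have hgx : g x = f x := by rw [hchar x hx, if_neg hxl]
      by_cases hfx : f x = x
      · rw [rootF_of_fix F g x (hgx.trans hfx), rootF_of_fix F f x hfx, if_neg hxl]
      · have hgne : g x ≠ x := hgx ▸ hfx
        rw [rootF_unroll m (c+1) F g rk' hgclos hri' hrb'' hF x hx hgne, hgx,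
          ih (f x) (hclos x hx)
            (by have := hri' x hx hgne; rw [hgx] at this; push_cast at hlt ⊢; omega),
          ← rootF_unroll m c F f rk hclos hri hrb (by omega) x hx hfx]

-- ---------- pvGet / pvSet access lemmas ----------

lemma pvGet_nonneg (l : List Int) (x : Int) (hx : 0 ≤ x) : pvGet l x = l.getD x.toNat 0 := by
  have h := PySem.List.pyGetD_natCast l x.toNat (0 : Int)
  rw [Int.toNat_of_nonneg hx] at h
  exact h

lemma pvSet_length (l : List Int) (i v : Int) : (pvSet l i v).length = l.length := by
  unfold pvSet; split <;> simp

lemma pvGet_set_self (l : List Int) (i v : Int) (h0 : 0 ≤ i) (h1 : i < (l.length : Int)) :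
    pvGet (pvSet l i v) i = v := by
  have hi : i.toNat < l.length := by omega
  rw [pvSet, if_pos h0, pvGet_nonneg _ _ h0,
    List.getD_eq_getElem _ _ (by simpa using hi), List.getElem_set_self]

lemma pvGet_set_ne (l : List Int) (i v x : Int) (h0 : 0 ≤ i) (hx : 0 ≤ x) (hne : x ≠ i) :
    pvGet (pvSet l i v) x = pvGet l x := by
  rw [pvSet, if_pos h0, pvGet_nonneg _ _ hx, pvGet_nonneg _ _ hx]
  have hne' : i.toNat ≠ x.toNat := by omega
  by_cases hlt : x.toNat < l.length
  · rw [List.getD_eq_getElem _ _ (by simpa using hlt), List.getD_eq_getElem _ _ hlt,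
      List.getElem_set_ne hne']
  · rw [List.getD_eq_getElem?_getD, List.getD_eq_getElem?_getD,
      List.getElem?_eq_none (by simpa using not_lt.mp hlt),
      List.getElem?_eq_none (by simpa using not_lt.mp hlt)]

-- ---------- find computes rootF and the path-compression formula ----------

lemma findA_spec (fuel : Nat) (p : List Int) (u : Int)
    (hnd : (chainF fuel (fun x => pvGet p x) u).Nodup)
    (hrange : ∀ x ∈ chainF fuel (fun x => pvGet p x) u, 0 ≤ x ∧ x < (p.length : Int)) :
    (findA fuel p u).2 = rootF fuel (fun x => pvGet p x) u ∧
    (findA fuel p u).1.length = p.length ∧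
    (∀ x : Int, 0 ≤ x → pvGet (findA fuel p u).1 x =
      if x ∈ chainF fuel (fun x => pvGet p x) u ∧ x ≠ rootF fuel (fun x => pvGet p x) u
      then rootF fuel (fun x => pvGet p x) u else pvGet p x) := by
  induction fuel generalizing u with
  | zero =>
    refine ⟨rfl, rfl, fun x hx => ?_⟩
    simp only [chainF, rootF, List.mem_singleton, findA]
    by_cases hxu : x = u
    · simp [hxu]
    · simp [hxu]
  | succ n ih =>
    by_cases h : pvGet p u = u
    · have hstep : findA (n+1) p u = (p, u) := by simp [findA, h]
      have hchain : chainF (n+1) (fun x => pvGet p x) u = [u] := by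
        simp only [chainF, if_pos h]
      have hroot : rootF (n+1) (fun x => pvGet p x) u = u := by
        simp only [rootF, if_pos h]
      rw [hstep, hchain, hroot]
      refine ⟨rfl, rfl, fun x hx => ?_⟩
      by_cases hxu : x = u
      · simp [hxu]
      · simp [hxu]
    · have hchain : chainF (n+1) (fun x => pvGet p x) u
          = u :: chainF n (fun x => pvGet p x) (pvGet p u) := by
        simp only [chainF, if_neg h]
      have hroot : rootF (n+1) (fun x => pvGet p x) u
          = rootF n (fun x => pvGet p x) (pvGet p u) := by
        simp only [rootF, if_neg h]
      rw [hchain] at hnd hrange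
      have hnd' := hnd.of_cons
      have hunotin : u ∉ chainF n (fun x => pvGet p x) (pvGet p u) :=
        (List.nodup_cons.mp hnd).1
      have hrange' : ∀ x ∈ chainF n (fun x => pvGet p x) (pvGet p u),
          0 ≤ x ∧ x < (p.length : Int) := fun x hx => hrange x (List.mem_cons_of_mem _ hx)
      obtain ⟨ih1, ih2, ih3⟩ := ih (pvGet p u) hnd' hrange'
      set r := rootF n (fun x => pvGet p x) (pvGet p u) with hr
      have hrmem : r ∈ chainF n (fun x => pvGet p x) (pvGet p u) := rootF_mem_chainF _ _ _
      have hur : u ≠ r := fun hh => hunotin (hh ▸ hrmem)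
      have hu0 : 0 ≤ u ∧ u < (p.length : Int) := hrange u (List.mem_cons_self)
      have hstep : findA (n+1) p u
          = (pvSet (findA n p (pvGet p u)).1 u (findA n p (pvGet p u)).2,
             pvGet (pvSet (findA n p (pvGet p u)).1 u (findA n p (pvGet p u)).2) u) := by
        simp only [findA, if_pos (by simpa using h : pvGet p u ≠ u)]
      have hlen2 : ((findA n p (pvGet p u)).1.length : Int) = (p.length : Int) := by
        exact_mod_cast congrArg Nat.cast ih2
      have hget_u : pvGet (pvSet (findA n p (pvGet p u)).1 u (findA n p (pvGet p u)).2) u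
          = (findA n p (pvGet p u)).2 :=
        pvGet_set_self _ _ _ hu0.1 (by rw [hlen2]; exact hu0.2)
      rw [hstep, hroot]
      refine ⟨by rw [hget_u]; exact ih1, by simp [pvSet_length, ih2], ?_⟩
      intro x hx
      rw [hchain]
      by_cases hxu : x = u
      · subst hxu
        rw [hget_u, ih1, if_pos ⟨List.mem_cons_self, hur⟩]
      · rw [pvGet_set_ne _ _ _ _ hu0.1 hx hxu, ih3 x hx]
        by_cases hmem : x ∈ chainF n (fun x => pvGet p x) (pvGet p u)
        · simp [hmem, hxu]
        · have hnm : x ∉ (u :: chainF n (fun x => pvGet p x) (pvGet p u)) := by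
            simp [hxu, hmem]
          simp [hmem, hnm]

-- one whole call of A's find, packaged semantically: result root, invariants of the
-- compressed array, roots and root-fixpoints preserved, untouched outside the actives
lemma findA_core (m c F : Nat) (p rk : List Int) (L : List Int)
    (hpl : p.length = L.length) (hm : m ≤ L.length)
    (hclos : ∀ x, pvUFS m x → pvUFS m (pvGet p x))
    (hri : ∀ x, pvUFS m x → pvGet p x ≠ x → pvGet rk x < pvGet rk (pvGet p x))
    (hrb : ∀ x, pvUFS m x → 0 ≤ pvGet rk x ∧ pvGet rk x ≤ (c : Int))
    (hF : c < F) (u : Int) (hu : pvUFS m u) :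
    (findA F p u).2 = rootF F (fun y => pvGet p y) u ∧
    (findA F p u).1.length = p.length ∧
    (∀ x, pvUFS m x → pvUFS m (pvGet (findA F p u).1 x)) ∧
    (∀ x, pvUFS m x → pvGet (findA F p u).1 x ≠ x →
      pvGet rk x < pvGet rk (pvGet (findA F p u).1 x)) ∧
    (∀ x, pvUFS m x →
      rootF F (fun y => pvGet (findA F p u).1 y) x = rootF F (fun y => pvGet p y) x) ∧
    (∀ x, pvUFS m x → (pvGet (findA F p u).1 x = x ↔ pvGet p x = x)) ∧
    (∀ x, 0 ≤ x → ¬ pvUFS m x → pvGet (findA F p u).1 x = pvGet p x) := by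
  set f : Int → Int := fun y => pvGet p y with hf
  have hclos' : ∀ x, pvUFS m x → pvUFS m (f x) := hclos
  have hnd : (chainF F f u).Nodup := chainF_nodup F f (fun y => pvGet rk y) m hclos'
    (fun x hx hne => hri x hx hne) u hu
  have hmemS : ∀ x ∈ chainF F f u, pvUFS m x := chainF_mem F f (fun y => pvGet rk y) m hclos' u hu
  have hrange : ∀ x ∈ chainF F f u, 0 ≤ x ∧ x < (p.length : Int) := by
    intro x hx
    have h2 := hmemS x hx
    unfold pvUFS at h2
    refine ⟨h2.1, by rw [hpl]; omega⟩
  obtain ⟨hA1, hA2, hA3⟩ := findA_spec F p u hnd hrange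
  set r : Int := rootF F f u with hrdef
  have hrS : pvUFS m r := hmemS r (rootF_mem_chainF F f u)
  have hchar : ∀ x, pvUFS m x → pvGet (findA F p u).1 x =
      if x ∈ chainF F f u ∧ x ≠ r then r else f x := fun x hx => hA3 x hx.1
  refine ⟨hA1, hA2, ?_, ?_, ?_, ?_, ?_⟩
  · intro x hx
    rw [hchar x hx]; split
    · exact hrS
    · exact hclos x hx
  · intro x hx hne
    rw [hchar x hx] at hne ⊢
    by_cases hc : x ∈ chainF F f u ∧ x ≠ r
    · rw [if_pos hc] at hne ⊢
      exact rank_lt_rootF F f (fun y => pvGet rk y) m hclos'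
        (fun x hx hne => hri x hx hne) u hu x hc.1 hc.2
    · rw [if_neg hc] at hne ⊢
      exact hri x hx hne
  · exact roots_compress m c F f (fun y => pvGet rk y) (fun y => pvGet (findA F p u).1 y)
      hclos' (fun x hx hne => hri x hx hne) hrb hF u hu hchar
  · intro x hx
    constructor
    · intro h1
      by_cases hc : x ∈ chainF F f u ∧ x ≠ r
      · rw [hchar x hx, if_pos hc] at h1
        exact absurd h1.symm hc.2
      · rw [hchar x hx, if_neg hc] at h1; exact h1
    · intro h1
      have hxr : ¬ (x ∈ chainF F f u ∧ x ≠ r) := by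
        rintro ⟨hmem, hner⟩
        exact hner (fix_mem_chainF_eq_rootF F f u x hmem h1)
      rw [hchar x hx, if_neg hxr]; exact h1
  · intro x hx0 hxS
    rw [hA3 x hx0, if_neg ?_]
    rintro ⟨hmem, -⟩
    exact hxS (hmemS x hmem)

-- ---------- encoding ids as labels ----------

-- label of id i in the first-encounter label list L
def encL (L : List Int) (i : Int) : Int := L.getD i.toNat 0

lemma encL_eq_getElem (L : List Int) (i : Int) (m : Nat) (hm : m ≤ L.length)
    (hi : pvUFS m i) : encL L i = L[i.toNat]'(by unfold pvUFS at hi; omega) := by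
  rw [encL, List.getD_eq_getElem]

lemma encL_inj (L : List Int) (hnd : L.Nodup) (m : Nat) (hm : m ≤ L.length)
    (i j : Int) (hi : pvUFS m i) (hj : pvUFS m j) (h : encL L i = encL L j) : i = j := by
  rw [encL_eq_getElem L i m hm hi, encL_eq_getElem L j m hm hj] at h
  have := (hnd.getElem_inj_iff).mp h
  unfold pvUFS at hi hj
  omega

lemma encL_mem_take (L : List Int) (m : Nat) (hm : m ≤ L.length) (i : Int)
    (hi : pvUFS m i) : encL L i ∈ L.take m := by
  rw [encL_eq_getElem L i m hm hi]
  have h1 : i.toNat < (L.take m).length := by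
    unfold pvUFS at hi; simp [List.length_take]; omega
  have h2 : (L.take m)[i.toNat]'h1 = L[i.toNat]'(by unfold pvUFS at hi; omega) :=
    List.getElem_take
  exact h2 ▸ List.getElem_mem h1

lemma encL_natCast (L : List Int) (i : Nat) : encL L (i : Int) = L.getD i 0 := by
  simp [encL]

-- ---------- dictionary helper lemmas ----------

lemma dict_get?_erase_of_ne {ν : Type} (d : PySem.Dict Int ν) (k k' : Int) (h : k' ≠ k) :
    (d.erase k).get? k' = d.get? k' := by
  obtain ⟨items⟩ := d
  simp only [PySem.Dict.erase, PySem.Dict.get?]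
  congr 1
  induction items with
  | nil => rfl
  | cons p items ih =>
    by_cases hp : p.1 = k
    · have h2 : (p.1 == k') = false := by
        rw [beq_eq_false_iff_ne]
        intro hh
        exact h (by rw [← hh, hp])
      rw [List.filter_cons_of_neg (by simp [hp]), List.find?_cons_of_neg (by simp [h2])]
      exact ih
    · rw [List.filter_cons_of_pos (by simp [hp])]
      by_cases h3 : p.1 = k'
      · rw [List.find?_cons_of_pos (by simp [h3]), List.find?_cons_of_pos (by simp [h3])]
      · rw [List.find?_cons_of_neg (by simp [h3]), List.find?_cons_of_neg (by simp [h3])]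
        exact ih

lemma dict_getD_erase_of_ne {ν : Type} (d : PySem.Dict Int ν) (k k' : Int) (h : k' ≠ k)
    (d0 : ν) : (d.erase k).getD k' d0 = d.getD k' d0 := by
  rw [PySem.Dict.getD_eq_get?_getD, PySem.Dict.getD_eq_get?_getD,
    dict_get?_erase_of_ne d k k' h]

lemma getD_foldl_insert_const (xs : List Int) (d : PySem.Dict Int Int) (v y d0 : Int) :
    (xs.foldl (fun c x => c.insert x v) d).getD y d0 = if y ∈ xs then v else d.getD y d0 := by
  induction xs generalizing d with
  | nil => simp
  | cons x xs ih =>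
    rw [List.foldl_cons, ih]
    by_cases hyx : y = x
    · by_cases hmem : y ∈ xs <;>
        simp [hyx, PySem.Dict.getD_insert_self]
    · by_cases hmem : y ∈ xs <;>
        simp [hmem, hyx, PySem.Dict.getD_insert_of_ne d v d0 hyx]

lemma keys_foldl_insert_const (xs : List Int) (d : PySem.Dict Int Int) (v : Int)
    (h : ∀ x ∈ xs, x ∈ d.keys) :
    (xs.foldl (fun c x => c.insert x v) d).keys = d.keys := by
  induction xs generalizing d with
  | nil => rfl
  | cons x xs ih =>
    rw [List.foldl_cons, ih (d.insert x v) ?_, PySem.Dict.keys_insert_of_contains d v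
      ((PySem.Dict.contains_iff_mem_keys _ _).mpr (h x List.mem_cons_self))]
    intro y hy
    rw [PySem.Dict.mem_keys_insert]
    exact Or.inr (h y (List.mem_cons_of_mem _ hy))

-- ---------- small arithmetic / list facts ----------

lemma max_eq_ite (M s : Int) : max M s = if s > M then s else M := by
  by_cases hlt : s > M
  · rw [if_pos hlt, max_eq_right hlt.le]
  · rw [if_neg hlt, max_eq_left (not_lt.mp hlt)]

lemma idxOf_lt_of_mem_take (L : List Int) (m : Nat) (a : Int) (ha : a ∈ L.take m) :
    L.idxOf a < m := by
  have h1 : List.idxOf a L = List.idxOf a (L.take m) := by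
    conv_lhs => rw [← List.take_append_drop m L]
    rw [List.idxOf_append, if_pos ha]
  have h2 : List.idxOf a (L.take m) < (L.take m).length :=
    List.idxOf_lt_length_iff.mpr ha
  have h3 : (L.take m).length ≤ m := by simp [List.length_take]
  omega

lemma mem_take_mono (L : List Int) (m1 m2 : Nat) (h : m1 ≤ m2) (x : Int)
    (hx : x ∈ L.take m1) : x ∈ L.take m2 := by
  have : L.take m1 = (L.take m2).take m1 := by
    rw [List.take_take, min_eq_left h]
  rw [this] at hx
  exact List.take_subset _ _ hx

lemma registerB_of_contains (st : UFB) (x : Int) (h : st.comp.contains x = true) :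
    registerB st x = st := by
  simp [registerB, h]

lemma not_pvUFS_zero (x : Int) : ¬ pvUFS 0 x := by
  intro hx; unfold pvUFS at hx; omega

-- ---------- the bisimulation invariant ----------
-- φ renames A's root ids to B's representative labels; the two states describe the
-- same partition of the first m labels, with matching component sizes and running max.

structure UFInv (L : List Int) (m c F : Nat) (uf : UFA) (st : UFB) (φ : Int → Int) : Prop where
  hpl : uf.parent.length = L.length
  hrl : uf.rank.length = L.length
  hsl : uf.size.length = L.length
  hm : m ≤ L.length
  hclos : ∀ i, pvUFS m i → pvUFS m (pvGet uf.parent i)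
  hfresh : ∀ i, (m : Int) ≤ i → i < (L.length : Int) →
    pvGet uf.parent i = i ∧ pvGet uf.rank i = 0 ∧ pvGet uf.size i = 1
  hri : ∀ i, pvUFS m i → pvGet uf.parent i ≠ i →
    pvGet uf.rank i < pvGet uf.rank (pvGet uf.parent i)
  hrb : ∀ i, pvUFS m i → 0 ≤ pvGet uf.rank i ∧ pvGet uf.rank i ≤ (c : Int)
  hkc : st.comp.keys = L.take m
  hphi : ∀ i, pvUFS m i →
    st.comp.getD (encL L i) 0 = φ (rootF F (fun y => pvGet uf.parent y) i)
  hpm : ∀ r, pvUFS m r → pvGet uf.parent r = r → φ r ∈ L.take m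
  hpinj : ∀ r s, pvUFS m r → pvUFS m s → pvGet uf.parent r = r → pvGet uf.parent s = s →
    φ r = φ s → r = s
  hsz : ∀ r, pvUFS m r → pvGet uf.parent r = r →
    ((st.members.getD (φ r) []).length : Int) = pvGet uf.size r
  hctn : ∀ r, pvUFS m r → pvGet uf.parent r = r → ∀ x,
    x ∈ st.members.getD (φ r) [] ↔
      ∃ i, pvUFS m i ∧ rootF F (fun y => pvGet uf.parent y) i = r ∧ encL L i = x
  hbest : uf.maxSize = st.best

lemma inv_mono_c (L : List Int) (m c c' F : Nat) (uf : UFA) (st : UFB) (φ : Int → Int)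
    (h : UFInv L m c F uf st φ) (hc : c ≤ c') : UFInv L m c' F uf st φ := by
  refine ⟨h.hpl, h.hrl, h.hsl, h.hm, h.hclos, h.hfresh, h.hri, ?_, h.hkc, h.hphi,
    h.hpm, h.hpinj, h.hsz, h.hctn, h.hbest⟩
  intro i hi
  have := h.hrb i hi
  omega

-- replacing A's parent array by one with the same roots keeps the invariant
lemma inv_reroot (L : List Int) (m c F : Nat) (uf : UFA) (st : UFB) (φ : Int → Int)
    (h : UFInv L m c F uf st φ) (p' : List Int)
    (hlen : p'.length = uf.parent.length)
    (hclos' : ∀ x, pvUFS m x → pvUFS m (pvGet p' x))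
    (hri' : ∀ x, pvUFS m x → pvGet p' x ≠ x →
      pvGet uf.rank x < pvGet uf.rank (pvGet p' x))
    (hroots : ∀ x, pvUFS m x →
      rootF F (fun y => pvGet p' y) x = rootF F (fun y => pvGet uf.parent y) x)
    (hfix : ∀ x, pvUFS m x → (pvGet p' x = x ↔ pvGet uf.parent x = x))
    (hout : ∀ x, 0 ≤ x → ¬ pvUFS m x → pvGet p' x = pvGet uf.parent x) :
    UFInv L m c F { uf with parent := p' } st φ := by
  refine ⟨by simpa [hlen] using h.hpl, h.hrl, h.hsl, h.hm, hclos', ?_, hri', h.hrb, h.hkc,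
    ?_, ?_, ?_, ?_, ?_, h.hbest⟩
  · intro i h1 h2
    have h0 : (0 : Int) ≤ i := by have : (0:Int) ≤ (m:Int) := by positivity
                                  omega
    have hni : ¬ pvUFS m i := by unfold pvUFS; omega
    rw [hout i h0 hni]
    exact h.hfresh i h1 h2
  · intro i hi
    show st.comp.getD (encL L i) 0 = φ (rootF F (fun y => pvGet p' y) i)
    rw [hroots i hi]
    exact h.hphi i hi
  · intro r hr hfx
    exact h.hpm r hr ((hfix r hr).mp hfx)
  · intro r s hr hs hfr hfs heq
    exact h.hpinj r s hr hs ((hfix r hr).mp hfr) ((hfix s hs).mp hfs) heq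
  · intro r hr hfx
    exact h.hsz r hr ((hfix r hr).mp hfx)
  · intro r hr hfx x
    show x ∈ st.members.getD (φ r) [] ↔
      ∃ i, pvUFS m i ∧ rootF F (fun y => pvGet p' y) i = r ∧ encL L i = x
    rw [h.hctn r hr ((hfix r hr).mp hfx) x]
    constructor
    · rintro ⟨i, hi, hroot, henc⟩
      exact ⟨i, hi, by rw [hroots i hi]; exact hroot, henc⟩
    · rintro ⟨i, hi, hroot, henc⟩
      exact ⟨i, hi, by rw [← hroots i hi]; exact hroot, henc⟩

-- ---------- registration of one label ----------

lemma register_core (L : List Int) (_hnd : L.Nodup) (m c F : Nat) (uf : UFA) (st : UFB)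
    (φ : Int → Int) (h : UFInv L m c F uf st φ) (a : Int) (rest : List Int)
    (hupd : L = PySem.Set.update (L.take m) (a :: rest)) :
    ∃ m' φ', UFInv L m' c F uf (registerB st a) φ' ∧ m ≤ m' ∧ a ∈ L.take m' ∧
      L = PySem.Set.update (L.take m') rest := by
  have hupd2 : L = PySem.Set.update (PySem.Set.add (L.take m) a) rest := by
    conv_lhs => rw [hupd]
    rw [PySem.Set.update_cons]
  by_cases hmem : a ∈ L.take m
  · refine ⟨m, φ, ?_, le_refl m, hmem, ?_⟩
    · rw [registerB_of_contains st a
        (by rw [PySem.Dict.contains_iff_mem_keys, h.hkc]; exact hmem)]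
      exact h
    · conv_lhs => rw [hupd2, PySem.Set.add_of_mem hmem]
  · rw [PySem.Set.add_of_not_mem hmem] at hupd2
    have hlen : (L.take m).length = m := by simp [List.length_take, h.hm]
    obtain ⟨junk, hjunk⟩ : ∃ t, L = (L.take m ++ [a]) ++ t :=
      ⟨_, hupd2.trans (PySem.Set.update_eq_append_filter _ _)⟩
    have hmlt : m < L.length := by
      have := congrArg List.length hjunk
      simp [hlen] at this
      omega
    have htake : L.take (m+1) = L.take m ++ [a] := by
      conv_lhs => rw [hjunk]
      exact List.take_left' (by simp [hlen])
    have hLm : L.getD m 0 = a := by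
      have h1 : L[m]? = some a := by
        rw [hjunk, List.getElem?_append_left (by simp [hlen]),
          List.getElem?_append_right (by omega), hlen]
        simp
      rw [List.getD_eq_getElem?_getD, h1]
      rfl
    have hcontf : st.comp.contains a = false := by
      rw [← Bool.not_eq_true, PySem.Dict.contains_iff_mem_keys, h.hkc]
      exact hmem
    have hreg : registerB st a =
        { st with comp := st.comp.insert a a, members := st.members.insert a [a] } := by
      simp [registerB, hcontf]
    have hfreshm := h.hfresh (m : Int) (le_refl _) (by exact_mod_cast hmlt)
    have hSsub : ∀ i : Int, pvUFS m i → pvUFS (m+1) i := by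
      intro i hi; unfold pvUFS at *; push_cast; omega
    have hSsplit : ∀ i : Int, pvUFS (m+1) i → i = (m : Int) ∨ pvUFS m i := by
      intro i hi; unfold pvUFS at *; push_cast at hi ⊢; omega
    have hrootS : ∀ i : Int, pvUFS m i →
        pvUFS m (rootF F (fun y => pvGet uf.parent y) i) :=
      fun i hi => chainF_mem F _ (fun y => pvGet uf.rank y) m h.hclos i hi _
        (rootF_mem_chainF F _ i)
    have hrootm : rootF F (fun y => pvGet uf.parent y) (m : Int) = (m : Int) :=
      rootF_of_fix F _ _ hfreshm.1
    have hencm : encL L ((m : Nat) : Int) = a := by rw [encL_natCast, hLm]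
    have hanotin : ∀ i : Int, pvUFS m i → encL L i ≠ a := by
      intro i hi hcontra
      exact hmem (hcontra ▸ encL_mem_take L m h.hm i hi)
    have hphinotin : ∀ r : Int, pvUFS m r → pvGet uf.parent r = r → φ r ≠ a := by
      intro r hr hfr hcontra
      exact hmem (hcontra ▸ h.hpm r hr hfr)
    refine ⟨m + 1, fun r => if r = (m : Int) then a else φ r, ?_, by omega,
      by rw [htake]; exact List.mem_append_right _ (by simp), ?_⟩
    swap
    · conv_lhs => rw [hupd2]
      rw [htake]
    refine ⟨h.hpl, h.hrl, h.hsl, by omega, ?_, ?_, ?_, ?_, ?_, ?_, ?_, ?_, ?_, ?_, ?_⟩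
    · intro i hi
      rcases hSsplit i hi with rfl | hi'
      · rw [hfreshm.1]; exact hi
      · exact hSsub _ (h.hclos i hi')
    · intro i h1 h2
      exact h.hfresh i (by push_cast at h1 ⊢; omega) h2
    · intro i hi hne
      rcases hSsplit i hi with rfl | hi'
      · exact absurd hfreshm.1 hne
      · exact h.hri i hi' hne
    · intro i hi
      rcases hSsplit i hi with rfl | hi'
      · rw [hfreshm.2.1]; constructor <;> omega
      · exact h.hrb i hi'
    · rw [hreg]
      show (st.comp.insert a a).keys = L.take (m+1)
      rw [PySem.Dict.keys_insert_of_not_contains st.comp a hcontf, h.hkc, htake]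
    · intro i hi
      rw [hreg]
      show (st.comp.insert a a).getD (encL L i) 0 = _
      rcases hSsplit i hi with rfl | hi'
      · rw [hencm, PySem.Dict.getD_insert_self, hrootm, if_pos rfl]
      · rw [PySem.Dict.getD_insert_of_ne st.comp a 0 (hanotin i hi'), h.hphi i hi',
          if_neg ?_]
        have := hrootS i hi'
        unfold pvUFS at this
        intro hcontra
        rw [hcontra] at this
        omega
    · intro r hr hfr
      rcases hSsplit r hr with rfl | hr'
      · rw [if_pos rfl, htake]
        exact List.mem_append_right _ (by simp)
      · rw [if_neg (by unfold pvUFS at hr'; omega)]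
        exact mem_take_mono L m (m+1) (by omega) _ (h.hpm r hr' hfr)
    · intro r s hr hs hfr hfs heq
      rcases hSsplit r hr with rfl | hr' <;> rcases hSsplit s hs with rfl | hs'
      · rfl
      · rw [if_pos rfl, if_neg (by unfold pvUFS at hs'; omega)] at heq
        exact absurd (heq ▸ h.hpm s hs' hfs) hmem
      · rw [if_neg (by unfold pvUFS at hr'; omega), if_pos rfl] at heq
        exact absurd (heq.symm ▸ h.hpm r hr' hfr) hmem
      · rw [if_neg (by unfold pvUFS at hr'; omega),
          if_neg (by unfold pvUFS at hs'; omega)] at heq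
        exact h.hpinj r s hr' hs' hfr hfs heq
    · intro r hr hfr
      rw [hreg]
      show ((((st.members.insert a [a]).getD (if r = (m:Int) then a else φ r) []).length : Nat) : Int) = _
      rcases hSsplit r hr with rfl | hr'
      · rw [if_pos rfl, PySem.Dict.getD_insert_self, hfreshm.2.2]
        rfl
      · rw [if_neg (by unfold pvUFS at hr'; omega),
          PySem.Dict.getD_insert_of_ne st.members [a] [] (hphinotin r hr' hfr)]
        exact h.hsz r hr' hfr
    · intro r hr hfr x
      rw [hreg]
      show x ∈ (st.members.insert a [a]).getD (if r = (m:Int) then a else φ r) [] ↔ _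
      rcases hSsplit r hr with rfl | hr'
      · rw [if_pos rfl, PySem.Dict.getD_insert_self]
        constructor
        · intro hx
          have hxa : x = a := by simpa using hx
          exact ⟨(m : Int), by unfold pvUFS; push_cast; omega, hrootm, hxa ▸ hencm⟩
        · rintro ⟨i, hi, hroot, henc⟩
          rcases hSsplit i hi with rfl | hi'
          · simp [← henc, hencm]
          · exfalso
            have := hrootS i hi'
            rw [hroot] at this
            unfold pvUFS at this
            omega
      · rw [if_neg (by unfold pvUFS at hr'; omega),
          PySem.Dict.getD_insert_of_ne st.members [a] [] (hphinotin r hr' hfr),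
          h.hctn r hr' hfr x]
        constructor
        · rintro ⟨i, hi, hroot, henc⟩
          exact ⟨i, hSsub i hi, hroot, henc⟩
        · rintro ⟨i, hi, hroot, henc⟩
          rcases hSsplit i hi with rfl | hi'
          · exfalso
            rw [hrootm] at hroot
            unfold pvUFS at hr'
            omega
          · exact ⟨i, hi', hroot, henc⟩
    · rw [hreg]
      exact h.hbest

-- ---------- merging two distinct roots, on both sides at once ----------

lemma merge_core (L : List Int) (hnd : L.Nodup) (m c F : Nat) (uf : UFA) (st : UFB)
    (φ : Int → Int) (h : UFInv L m c F uf st φ) (hF : c + 1 < F)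
    (wA lA RW RL : Int) (hwS : pvUFS m wA) (hlS : pvUFS m lA)
    (hwfix : pvGet uf.parent wA = wA) (hlfix : pvGet uf.parent lA = lA)
    (hlw : lA ≠ wA)
    (hsets : (RW = wA ∧ RL = lA) ∨ (RW = lA ∧ RL = wA))
    (rk3 : List Int) (hrk3len : rk3.length = L.length)
    (hrk3fresh : ∀ i, (m : Int) ≤ i → i < (L.length : Int) → pvGet rk3 i = 0)
    (hri3 : ∀ x, pvUFS m x → pvGet uf.parent x ≠ x →
      pvGet rk3 x < pvGet rk3 (pvGet uf.parent x))
    (hedge : pvGet rk3 lA < pvGet rk3 wA)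
    (hrb3 : ∀ x, pvUFS m x → 0 ≤ pvGet rk3 x ∧ pvGet rk3 x ≤ (c : Int) + 1) :
    ∃ φ', UFInv L m (c+1) F
      ⟨pvSet uf.parent lA wA, rk3,
        pvSet uf.size wA (pvGet uf.size wA + pvGet uf.size lA),
        max uf.maxSize (pvGet (pvSet uf.size wA (pvGet uf.size wA + pvGet uf.size lA)) wA)⟩
      ⟨(st.members.getD (φ RL) []).foldl (fun d x => d.insert x (φ RW)) st.comp,
        (st.members.erase (φ RL)).insert (φ RW)
          ((st.members.erase (φ RL)).getD (φ RW) [] ++ st.members.getD (φ RL) []),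
        if ((((st.members.erase (φ RL)).getD (φ RW) [] ++ st.members.getD (φ RL) []).length : Int)
            > st.best)
        then ((((st.members.erase (φ RL)).getD (φ RW) [] ++ st.members.getD (φ RL) []).length : Int))
        else st.best⟩ φ' := by
  set f : Int → Int := fun y => pvGet uf.parent y with hf
  have hRWS : pvUFS m RW := by rcases hsets with ⟨rfl, rfl⟩ | ⟨rfl, rfl⟩ <;> assumption
  have hRLS : pvUFS m RL := by rcases hsets with ⟨rfl, rfl⟩ | ⟨rfl, rfl⟩ <;> assumption
  have hRWfix : f RW = RW := by rcases hsets with ⟨rfl, rfl⟩ | ⟨rfl, rfl⟩ <;> assumption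
  have hRLfix : f RL = RL := by rcases hsets with ⟨rfl, rfl⟩ | ⟨rfl, rfl⟩ <;> assumption
  have hRWL : RW ≠ RL := by
    rcases hsets with ⟨rfl, rfl⟩ | ⟨rfl, rfl⟩
    · exact fun hh => hlw hh.symm
    · exact hlw
  have hcover : ∀ z : Int, (z = RW ∨ z = RL) ↔ (z = wA ∨ z = lA) := by
    intro z; rcases hsets with ⟨rfl, rfl⟩ | ⟨rfl, rfl⟩ <;> tauto
  have hkeyne : φ RW ≠ φ RL := by
    intro hcontra
    exact hRWL (h.hpinj RW RL hRWS hRLS hRWfix hRLfix hcontra)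
  have hlbound : lA < (uf.parent.length : Int) := by
    rw [h.hpl]; unfold pvUFS at hlS; have := h.hm; omega
  have hwszbound : wA < (uf.size.length : Int) := by
    rw [h.hsl]; unfold pvUFS at hwS; have := h.hm; omega
  set p3 : List Int := pvSet uf.parent lA wA with hp3
  have hchar : ∀ x, pvUFS m x → pvGet p3 x = if x = lA then wA else f x := by
    intro x hx
    by_cases hxl : x = lA
    · rw [if_pos hxl, hxl, hp3, pvGet_set_self uf.parent lA wA hlS.1 hlbound]
    · rw [if_neg hxl, hp3, pvGet_set_ne uf.parent lA wA x hlS.1 hx.1 hxl]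
  have hclos3 : ∀ x, pvUFS m x → pvUFS m (pvGet p3 x) := by
    intro x hx
    rw [hchar x hx]; split
    · exact hwS
    · exact h.hclos x hx
  have hri3' : ∀ x, pvUFS m x → pvGet p3 x ≠ x → pvGet rk3 x < pvGet rk3 (pvGet p3 x) := by
    intro x hx hne
    rw [hchar x hx] at hne ⊢
    by_cases hxl : x = lA
    · rw [if_pos hxl] at hne ⊢
      rw [hxl]; exact hedge
    · rw [if_neg hxl] at hne ⊢
      exact hri3 x hx hne
  have hroot3 := roots_link m c F f (fun y => pvGet uf.rank y) (fun y => pvGet rk3 y)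
    (fun y => pvGet p3 y) h.hclos h.hri h.hrb hF wA lA hwS hlS hwfix hlfix hlw hchar
    hri3' hrb3
  have hfix3 : ∀ r, pvUFS m r → (pvGet p3 r = r ↔ (f r = r ∧ r ≠ lA)) := by
    intro r hr
    rw [hchar r hr]
    by_cases hrl : r = lA
    · subst hrl
      rw [if_pos rfl]
      constructor
      · intro hh; exact absurd hh.symm hlw
      · rintro ⟨-, hh⟩; exact absurd rfl hh
    · rw [if_neg hrl]
      exact ⟨fun hh => ⟨hh, hrl⟩, fun hh => hh.1⟩
  have hrootS : ∀ i, pvUFS m i → pvUFS m (rootF F f i) :=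
    fun i hi => chainF_mem F f (fun y => pvGet uf.rank y) m h.hclos i hi _
      (rootF_mem_chainF F f i)
  have hrootfix : ∀ i, pvUFS m i → f (rootF F f i) = rootF F f i := by
    intro i hi
    exact rootF_fix F f (fun y => pvGet uf.rank y) m (c : Int) h.hclos h.hri
      (fun x hx => (h.hrb x hx).2) i hi (by have := h.hrb i hi; push_cast; omega)
  -- membership in the loser's member list characterises the loser's class
  have hmemsmall : ∀ i, pvUFS m i →
      (encL L i ∈ st.members.getD (φ RL) [] ↔ rootF F f i = RL) := by
    intro i hi
    rw [h.hctn RL hRLS hRLfix (encL L i)]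
    constructor
    · rintro ⟨j, hj, hroot, henc⟩
      rwa [encL_inj L hnd m h.hm j i hj hi henc] at hroot
    · intro hroot
      exact ⟨i, hi, hroot, rfl⟩
  -- the new big list and sizes
  have hgetW : (st.members.erase (φ RL)).getD (φ RW) [] = st.members.getD (φ RW) [] :=
    dict_getD_erase_of_ne st.members (φ RL) (φ RW) hkeyne []
  have hsum : ((st.members.getD (φ RW) []).length : Int)
      + ((st.members.getD (φ RL) []).length : Int)
      = pvGet uf.size wA + pvGet uf.size lA := by
    rw [h.hsz RW hRWS hRWfix, h.hsz RL hRLS hRLfix]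
    rcases hsets with ⟨rfl, rfl⟩ | ⟨rfl, rfl⟩
    · rfl
    · omega
  have hsz3W : pvGet (pvSet uf.size wA (pvGet uf.size wA + pvGet uf.size lA)) wA
      = pvGet uf.size wA + pvGet uf.size lA :=
    pvGet_set_self uf.size wA _ hwS.1 hwszbound
  have hbiglen : (((st.members.erase (φ RL)).getD (φ RW) []
      ++ st.members.getD (φ RL) []).length : Int)
      = pvGet uf.size wA + pvGet uf.size lA := by
    rw [hgetW, List.length_append]
    push_cast
    exact hsum
  have hphiold : ∀ r, pvUFS m r → f r = r → r ≠ wA → r ≠ lA → φ r ≠ φ RW ∧ φ r ≠ φ RL := by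
    intro r hr hfr hrw hrl
    constructor
    · intro hcontra
      have := h.hpinj r RW hr hRWS hfr hRWfix hcontra
      rcases hsets with ⟨hh, -⟩ | ⟨hh, -⟩
      · exact hrw (this.trans hh)
      · exact hrl (this.trans hh)
    · intro hcontra
      have := h.hpinj r RL hr hRLS hfr hRLfix hcontra
      rcases hsets with ⟨-, hh⟩ | ⟨-, hh⟩
      · exact hrl (this.trans hh)
      · exact hrw (this.trans hh)
  refine ⟨fun r => if r = wA then φ RW else φ r, ?_⟩
  refine ⟨?_, hrk3len, ?_, h.hm, hclos3, ?_, hri3', hrb3, ?_, ?_, ?_, ?_, ?_, ?_, ?_⟩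
  · show p3.length = L.length
    rw [hp3, pvSet_length]; exact h.hpl
  · show (pvSet uf.size wA (pvGet uf.size wA + pvGet uf.size lA)).length = L.length
    rw [pvSet_length]; exact h.hsl
  · -- fresh ids untouched
    intro i h1 h2
    have h0 : (0 : Int) ≤ i := by have : (0:Int) ≤ (m:Int) := by positivity
                                  omega
    have hil : i ≠ lA := by unfold pvUFS at hlS; omega
    have hiw : i ≠ wA := by unfold pvUFS at hwS; omega
    refine ⟨?_, hrk3fresh i h1 h2, ?_⟩
    · show pvGet p3 i = i
      rw [hp3, pvGet_set_ne uf.parent lA wA i hlS.1 h0 hil]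
      exact (h.hfresh i h1 h2).1
    · show pvGet (pvSet uf.size wA (pvGet uf.size wA + pvGet uf.size lA)) i = 1
      rw [pvGet_set_ne uf.size _ _ i hwS.1 h0 hiw]
      exact (h.hfresh i h1 h2).2.2
  · -- keys of the relabelled comp
    show ((st.members.getD (φ RL) []).foldl (fun d x => d.insert x (φ RW)) st.comp).keys
      = L.take m
    rw [keys_foldl_insert_const _ _ _ ?_, h.hkc]
    intro x hx
    obtain ⟨i, hi, -, henc⟩ := (h.hctn RL hRLS hRLfix x).mp hx
    rw [h.hkc]
    exact henc ▸ encL_mem_take L m h.hm i hi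
  · -- comp / φ' correspondence
    intro i hi
    show ((st.members.getD (φ RL) []).foldl (fun d x => d.insert x (φ RW)) st.comp).getD
        (encL L i) 0 = _
    rw [getD_foldl_insert_const]
    rw [hroot3 i hi]
    by_cases hmem : encL L i ∈ st.members.getD (φ RL) []
    · rw [if_pos hmem]
      have hrooti : rootF F f i = RL := (hmemsmall i hi).mp hmem
      have : (if rootF F f i = lA then wA else rootF F f i) = wA := by
        rcases hsets with ⟨-, hh⟩ | ⟨-, hh⟩
        · rw [hrooti, hh, if_pos rfl]
        · rw [hrooti, hh, if_neg (fun hc => hlw hc.symm)]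
      rw [this, if_pos rfl]
    · rw [if_neg hmem, h.hphi i hi]
      have hrooti : rootF F f i ≠ RL := fun hc => hmem ((hmemsmall i hi).mpr hc)
      by_cases hrw : rootF F f i = RW
      · have : (if rootF F f i = lA then wA else rootF F f i) = wA := by
          rcases hsets with ⟨hh, -⟩ | ⟨hh, -⟩
          · rw [hrw, hh, if_neg (fun hc => hlw hc.symm)]
          · rw [hrw, hh, if_pos rfl]
        rw [this, if_pos rfl, hrw]
      · have hnot : rootF F f i ≠ wA ∧ rootF F f i ≠ lA := by
          constructor
          · intro hc
            rcases ((hcover (rootF F f i)).mpr (Or.inl hc)) with hh | hh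
            · exact hrw hh
            · exact hrooti hh
          · intro hc
            rcases ((hcover (rootF F f i)).mpr (Or.inr hc)) with hh | hh
            · exact hrw hh
            · exact hrooti hh
        rw [if_neg hnot.2, if_neg hnot.1]
  · -- φ' lands in the registered labels
    intro r hr hfx
    by_cases hrw : r = wA
    · rw [if_pos hrw]
      exact h.hpm RW hRWS hRWfix
    · rw [if_neg hrw]
      obtain ⟨hfr, -⟩ := (hfix3 r hr).mp hfx
      exact h.hpm r hr hfr
  · -- φ' injective on the new roots
    intro r s hr hs hfr hfs heq
    obtain ⟨hfr', hrl⟩ := (hfix3 r hr).mp hfr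
    obtain ⟨hfs', hsl⟩ := (hfix3 s hs).mp hfs
    by_cases hrw : r = wA <;> by_cases hsw : s = wA
    · rw [hrw, hsw]
    · rw [if_pos hrw, if_neg hsw] at heq
      exfalso
      have := h.hpinj s RW hs hRWS hfs' hRWfix heq.symm
      rcases ((hcover s).mp (Or.inl this)) with hh | hh
      · exact hsw hh
      · exact hsl hh
    · rw [if_neg hrw, if_pos hsw] at heq
      exfalso
      have := h.hpinj r RW hr hRWS hfr' hRWfix heq
      rcases ((hcover r).mp (Or.inl this)) with hh | hh
      · exact hrw hh
      · exact hrl hh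
    · rw [if_neg hrw, if_neg hsw] at heq
      exact h.hpinj r s hr hs hfr' hfs' heq
  · -- component sizes
    intro r hr hfx
    obtain ⟨hfr, hrl⟩ := (hfix3 r hr).mp hfx
    by_cases hrw : r = wA
    · subst hrw
      rw [if_pos rfl]
      show (((((st.members.erase (φ RL)).insert (φ RW)
        ((st.members.erase (φ RL)).getD (φ RW) [] ++ st.members.getD (φ RL) [])).getD (φ RW) []).length : Nat) : Int) = _
      rw [PySem.Dict.getD_insert_self, hsz3W, ← hbiglen]
    · rw [if_neg hrw]
      obtain ⟨hne1, hne2⟩ := hphiold r hr hfr hrw hrl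
      show (((((st.members.erase (φ RL)).insert (φ RW)
        ((st.members.erase (φ RL)).getD (φ RW) [] ++ st.members.getD (φ RL) [])).getD (φ r) []).length : Nat) : Int) = _
      rw [PySem.Dict.getD_insert_of_ne _ _ [] hne1,
        dict_getD_erase_of_ne st.members (φ RL) (φ r) hne2 [],
        pvGet_set_ne uf.size _ _ r hwS.1 hr.1 hrw]
      exact h.hsz r hr hfr
  · -- component membership
    intro r hr hfx x
    obtain ⟨hfr, hrl⟩ := (hfix3 r hr).mp hfx
    by_cases hrw : r = wA
    · subst hrw
      rw [if_pos rfl]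
      show x ∈ ((st.members.erase (φ RL)).insert (φ RW)
        ((st.members.erase (φ RL)).getD (φ RW) [] ++ st.members.getD (φ RL) [])).getD (φ RW) [] ↔ _
      rw [PySem.Dict.getD_insert_self, hgetW, List.mem_append]
      constructor
      · rintro (hx | hx)
        · obtain ⟨i, hi, hroot, henc⟩ := (h.hctn RW hRWS hRWfix x).mp hx
          refine ⟨i, hi, ?_, henc⟩
          rw [hroot3 i hi, hroot]
          rcases hsets with ⟨hh, -⟩ | ⟨hh, -⟩
          · rw [hh, if_neg (fun hc => hlw hc.symm)]
          · rw [hh, if_pos rfl]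
        · obtain ⟨i, hi, hroot, henc⟩ := (h.hctn RL hRLS hRLfix x).mp hx
          refine ⟨i, hi, ?_, henc⟩
          rw [hroot3 i hi, hroot]
          rcases hsets with ⟨-, hh⟩ | ⟨-, hh⟩
          · rw [hh, if_pos rfl]
          · rw [hh, if_neg (fun hc => hlw hc.symm)]
      · rintro ⟨i, hi, hroot, henc⟩
        rw [hroot3 i hi] at hroot
        by_cases hc : rootF F f i = lA
        · have hor : rootF F f i = RW ∨ rootF F f i = RL := (hcover _).mpr (Or.inr hc)
          rcases hor with hh | hh
          · exact Or.inl ((h.hctn RW hRWS hRWfix x).mpr ⟨i, hi, hh, henc⟩)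
          · exact Or.inr ((h.hctn RL hRLS hRLfix x).mpr ⟨i, hi, hh, henc⟩)
        · rw [if_neg hc] at hroot
          have hor : rootF F f i = RW ∨ rootF F f i = RL := (hcover _).mpr (Or.inl hroot)
          rcases hor with hh | hh
          · exact Or.inl ((h.hctn RW hRWS hRWfix x).mpr ⟨i, hi, hh, henc⟩)
          · exact Or.inr ((h.hctn RL hRLS hRLfix x).mpr ⟨i, hi, hh, henc⟩)
    · rw [if_neg hrw]
      obtain ⟨hne1, hne2⟩ := hphiold r hr hfr hrw hrl
      show x ∈ ((st.members.erase (φ RL)).insert (φ RW)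
        ((st.members.erase (φ RL)).getD (φ RW) [] ++ st.members.getD (φ RL) [])).getD (φ r) [] ↔ _
      rw [PySem.Dict.getD_insert_of_ne _ _ [] hne1,
        dict_getD_erase_of_ne st.members (φ RL) (φ r) hne2 [],
        h.hctn r hr hfr x]
      constructor
      · rintro ⟨i, hi, hroot, henc⟩
        refine ⟨i, hi, ?_, henc⟩
        rw [hroot3 i hi, hroot, if_neg hrl]
      · rintro ⟨i, hi, hroot, henc⟩
        rw [hroot3 i hi] at hroot
        refine ⟨i, hi, ?_, henc⟩
        by_cases hc : rootF F f i = lA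
        · rw [if_pos hc] at hroot
          exact absurd hroot.symm hrw
        · rw [if_neg hc] at hroot
          exact hroot
  · -- running max
    show max uf.maxSize (pvGet (pvSet uf.size wA (pvGet uf.size wA + pvGet uf.size lA)) wA) = _
    rw [hsz3W, ← hbiglen, h.hbest, max_eq_ite]

-- ---------- one whole union query, on both sides ----------

lemma union_core (L : List Int) (hnd : L.Nodup) (m c F : Nat) (uf : UFA) (st : UFB)
    (φ : Int → Int) (h : UFInv L m c F uf st φ) (hF : c + 1 < F)
    (a b : Int) (ha : a ∈ L.take m) (hb : b ∈ L.take m) :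
    ∃ φ', UFInv L m (c+1) F
      (unionA F uf ((L.idxOf a : Nat) : Int) ((L.idxOf b : Nat) : Int)) (stepB st a b) φ' := by
  have hF1 : c < F := by omega
  have hiam : L.idxOf a < m := idxOf_lt_of_mem_take L m a ha
  have hibm : L.idxOf b < m := idxOf_lt_of_mem_take L m b hb
  have hial : L.idxOf a < L.length := by have := h.hm; omega
  have hibl : L.idxOf b < L.length := by have := h.hm; omega
  have haS : pvUFS m ((L.idxOf a : Nat) : Int) := ⟨by positivity, by exact_mod_cast hiam⟩
  have hbS : pvUFS m ((L.idxOf b : Nat) : Int) := ⟨by positivity, by exact_mod_cast hibm⟩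
  have henca : encL L ((L.idxOf a : Nat) : Int) = a := by
    rw [encL_natCast, List.getD_eq_getElem _ _ hial]
    exact List.getElem_idxOf hial
  have hencb : encL L ((L.idxOf b : Nat) : Int) = b := by
    rw [encL_natCast, List.getD_eq_getElem _ _ hibl]
    exact List.getElem_idxOf hibl
  have hrega : registerB st a = st := registerB_of_contains st a
    (by rw [PySem.Dict.contains_iff_mem_keys, h.hkc]; exact ha)
  have hregb : registerB st b = st := registerB_of_contains st b
    (by rw [PySem.Dict.contains_iff_mem_keys, h.hkc]; exact hb)
  -- first find
  obtain ⟨C1root, C1len, C1clos, C1ri, C1roots, C1fix, C1out⟩ :=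
    findA_core m c F uf.parent uf.rank L h.hpl h.hm h.hclos h.hri h.hrb hF1
      ((L.idxOf a : Nat) : Int) haS
  set p1 : List Int := (findA F uf.parent ((L.idxOf a : Nat) : Int)).1 with hp1
  -- second find
  obtain ⟨C2root, C2len, C2clos, C2ri, C2roots, C2fix, C2out⟩ :=
    findA_core m c F p1 uf.rank L (C1len.trans h.hpl) h.hm C1clos C1ri h.hrb hF1
      ((L.idxOf b : Nat) : Int) hbS
  set p2 : List Int := (findA F p1 ((L.idxOf b : Nat) : Int)).1 with hp2
  set f : Int → Int := fun y => pvGet uf.parent y with hfdef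
  set Ru : Int := rootF F f ((L.idxOf a : Nat) : Int) with hRu
  set Rv : Int := rootF F f ((L.idxOf b : Nat) : Int) with hRv
  have hrveq : (findA F p1 ((L.idxOf b : Nat) : Int)).2 = Rv := by
    rw [C2root, C1roots _ hbS]
  have hrootS : ∀ i, pvUFS m i → pvUFS m (rootF F f i) :=
    fun i hi => chainF_mem F f (fun y => pvGet uf.rank y) m h.hclos i hi _
      (rootF_mem_chainF F f i)
  have hRuS : pvUFS m Ru := hrootS _ haS
  have hRvS : pvUFS m Rv := hrootS _ hbS
  have hRufix : f Ru = Ru :=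
    rootF_fix F f (fun y => pvGet uf.rank y) m (c : Int) h.hclos h.hri
      (fun x hx => (h.hrb x hx).2) _ haS (by have := h.hrb _ haS; push_cast; omega)
  have hRvfix : f Rv = Rv :=
    rootF_fix F f (fun y => pvGet uf.rank y) m (c : Int) h.hclos h.hri
      (fun x hx => (h.hrb x hx).2) _ hbS (by have := h.hrb _ hbS; push_cast; omega)
  -- the invariant transported to the twice-compressed parent array
  have Inv1 : UFInv L m c F { uf with parent := p1 } st φ :=
    inv_reroot L m c F uf st φ h p1 C1len C1clos C1ri C1roots C1fix C1out
  have Inv2 : UFInv L m c F { uf with parent := p2 } st φ := by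
    have := inv_reroot L m c F { uf with parent := p1 } st φ Inv1 p2 C2len C2clos C2ri
      C2roots C2fix C2out
    exact this
  have hRufix2 : pvGet p2 Ru = Ru := (C2fix Ru hRuS).mpr ((C1fix Ru hRuS).mpr hRufix)
  have hRvfix2 : pvGet p2 Rv = Rv := (C2fix Rv hRvS).mpr ((C1fix Rv hRvS).mpr hRvfix)
  -- B's representative lookups
  have hga : st.comp.getD a 0 = φ Ru := by
    rw [← henca, h.hphi _ haS]
  have hgb : st.comp.getD b 0 = φ Rv := by
    rw [← hencb, h.hphi _ hbS]
  have hst1 : registerB (registerB st a) b = st := by rw [hrega, hregb]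
  -- reduce both programs to their branch structure
  simp only [stepB, unionA, hst1, hga, hgb]
  rw [C1root, ← hp1, hrveq, ← hp2]
  by_cases hRR : Ru = Rv
  · -- same component on both sides: nothing merges
    rw [if_neg (not_not_intro hRR), if_neg (not_not_intro (congrArg φ hRR))]
    exact ⟨φ, inv_mono_c L m c (c+1) F _ st φ Inv2 (by omega)⟩
  · have hkeyne : φ Ru ≠ φ Rv := fun hcontra =>
      hRR (h.hpinj Ru Rv hRuS hRvS hRufix hRvfix hcontra)
    rw [if_pos hRR, if_pos hkeyne]
    -- B's branch: compare the two member-list lengths (= the two component sizes)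
    have hlen_iff : ((st.members.getD (φ Ru) []).length < (st.members.getD (φ Rv) []).length)
        ↔ pvGet uf.size Ru < pvGet uf.size Rv := by
      rw [← h.hsz Ru hRuS hRufix, ← h.hsz Rv hRvS hRvfix]
      exact_mod_cast Iff.rfl
    -- rank data for the two A branches that do not bump ranks
    have hrb1 : ∀ x, pvUFS m x → 0 ≤ pvGet uf.rank x ∧ pvGet uf.rank x ≤ (c : Int) + 1 := by
      intro x hx; have := h.hrb x hx; omega
    have hfreshrk : ∀ i, (m : Int) ≤ i → i < (L.length : Int) → pvGet uf.rank i = 0 :=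
      fun i h1 h2 => (h.hfresh i h1 h2).2.1
    -- rank data for the rank-bumping A branch
    have hranku : Ru < (uf.rank.length : Int) := by
      rw [h.hrl]; unfold pvUFS at hRuS; have := h.hm; omega
    -- resolve B's size comparison, then A's rank comparison
    by_cases hbc : (st.members.getD (φ Ru) []).length < (st.members.getD (φ Rv) []).length
    · simp only [if_pos hbc]
      by_cases h1 : pvGet uf.rank Ru > pvGet uf.rank Rv
      · simp only [if_pos h1]
        exact merge_core L hnd m c F { uf with parent := p2 } st φ Inv2 hF
          Ru Rv Rv Ru hRuS hRvS hRufix2 hRvfix2 (fun hh => hRR hh.symm)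
          (Or.inr ⟨rfl, rfl⟩) uf.rank h.hrl hfreshrk C2ri h1 hrb1
      · simp only [if_neg h1]
        by_cases h2 : pvGet uf.rank Ru < pvGet uf.rank Rv
        · simp only [if_pos h2]
          exact merge_core L hnd m c F { uf with parent := p2 } st φ Inv2 hF
            Rv Ru Rv Ru hRvS hRuS hRvfix2 hRufix2 hRR
            (Or.inl ⟨rfl, rfl⟩) uf.rank h.hrl hfreshrk C2ri h2 hrb1
        · have heq : pvGet uf.rank Ru = pvGet uf.rank Rv := by omega
          simp only [if_neg h2]
          refine merge_core L hnd m c F { uf with parent := p2 } st φ Inv2 hF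
            Ru Rv Rv Ru hRuS hRvS hRufix2 hRvfix2 (fun hh => hRR hh.symm)
            (Or.inr ⟨rfl, rfl⟩) (pvSet uf.rank Ru (pvGet uf.rank Ru + 1))
            (by rw [pvSet_length]; exact h.hrl) ?_ ?_ ?_ ?_
          · intro i hi1 hi2
            rw [pvGet_set_ne uf.rank Ru _ i hRuS.1
              (by have : (0:Int) ≤ (m:Int) := by positivity
                  omega)
              (by unfold pvUFS at hRuS; omega)]
            exact hfreshrk i hi1 hi2
          · intro x hx hne
            have hxRu : x ≠ Ru := by
              intro hcontra; subst hcontra; exact hne hRufix2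
            rw [pvGet_set_ne uf.rank Ru _ x hRuS.1 hx.1 hxRu]
            by_cases hpx : pvGet p2 x = Ru
            · rw [hpx, pvGet_set_self uf.rank Ru _ hRuS.1 hranku]
              have := C2ri x hx hne
              rw [hpx] at this
              omega
            · rw [pvGet_set_ne uf.rank Ru _ _ hRuS.1 (C2clos x hx).1 hpx]
              exact C2ri x hx hne
          · rw [pvGet_set_ne uf.rank Ru _ Rv hRuS.1 hRvS.1 (fun hh => hRR hh.symm),
              pvGet_set_self uf.rank Ru _ hRuS.1 hranku]
            omega
          · intro x hx
            by_cases hxRu : x = Ru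
            · subst hxRu
              rw [pvGet_set_self uf.rank Ru _ hRuS.1 hranku]
              have := h.hrb Ru hRuS
              omega
            · rw [pvGet_set_ne uf.rank Ru _ x hRuS.1 hx.1 hxRu]
              have := h.hrb x hx
              omega
    · simp only [if_neg hbc]
      by_cases h1 : pvGet uf.rank Ru > pvGet uf.rank Rv
      · simp only [if_pos h1]
        exact merge_core L hnd m c F { uf with parent := p2 } st φ Inv2 hF
          Ru Rv Ru Rv hRuS hRvS hRufix2 hRvfix2 (fun hh => hRR hh.symm)
          (Or.inl ⟨rfl, rfl⟩) uf.rank h.hrl hfreshrk C2ri h1 hrb1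
      · simp only [if_neg h1]
        by_cases h2 : pvGet uf.rank Ru < pvGet uf.rank Rv
        · simp only [if_pos h2]
          exact merge_core L hnd m c F { uf with parent := p2 } st φ Inv2 hF
            Rv Ru Ru Rv hRvS hRuS hRvfix2 hRufix2 hRR
            (Or.inr ⟨rfl, rfl⟩) uf.rank h.hrl hfreshrk C2ri h2 hrb1
        · have heq : pvGet uf.rank Ru = pvGet uf.rank Rv := by omega
          simp only [if_neg h2]
          refine merge_core L hnd m c F { uf with parent := p2 } st φ Inv2 hF
            Ru Rv Ru Rv hRuS hRvS hRufix2 hRvfix2 (fun hh => hRR hh.symm)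
            (Or.inl ⟨rfl, rfl⟩) (pvSet uf.rank Ru (pvGet uf.rank Ru + 1))
            (by rw [pvSet_length]; exact h.hrl) ?_ ?_ ?_ ?_
          · intro i hi1 hi2
            rw [pvGet_set_ne uf.rank Ru _ i hRuS.1
              (by have : (0:Int) ≤ (m:Int) := by positivity
                  omega)
              (by unfold pvUFS at hRuS; omega)]
            exact hfreshrk i hi1 hi2
          · intro x hx hne
            have hxRu : x ≠ Ru := by
              intro hcontra; subst hcontra; exact hne hRufix2
            rw [pvGet_set_ne uf.rank Ru _ x hRuS.1 hx.1 hxRu]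
            by_cases hpx : pvGet p2 x = Ru
            · rw [hpx, pvGet_set_self uf.rank Ru _ hRuS.1 hranku]
              have := C2ri x hx hne
              rw [hpx] at this
              omega
            · rw [pvGet_set_ne uf.rank Ru _ _ hRuS.1 (C2clos x hx).1 hpx]
              exact C2ri x hx hne
          · rw [pvGet_set_ne uf.rank Ru _ Rv hRuS.1 hRvS.1 (fun hh => hRR hh.symm),
              pvGet_set_self uf.rank Ru _ hRuS.1 hranku]
            omega
          · intro x hx
            by_cases hxRu : x = Ru
            · subst hxRu
              rw [pvGet_set_self uf.rank Ru _ hRuS.1 hranku]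
              have := h.hrb Ru hRuS
              omega
            · rw [pvGet_set_ne uf.rank Ru _ x hRuS.1 hx.1 hxRu]
              have := h.hrb x hx
              omega

-- ---------- the first pass of A: people_map assigns first-encounter indices ----------

def insD (st : PySem.Dict Int Int × Int) (x : Int) : PySem.Dict Int Int × Int :=
  if st.1.contains x then st else (st.1.insert x st.2, st.2 + 1)

lemma buildA_fold (qs : List (List Int)) (hpre : ∀ q ∈ qs, q.length = 2)
    (st0 : PySem.Dict Int Int × Int) :
    qs.foldl (fun (st : PySem.Dict Int Int × Int) q =>
      match q with
      | [a, b] =>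
        let st1 := if st.1.contains a then st else (st.1.insert a st.2, st.2 + 1)
        if st1.1.contains b then st1 else (st1.1.insert b st1.2, st1.2 + 1)
      | _ => st) st0 = (qs.flatMap id).foldl insD st0 := by
  induction qs generalizing st0 with
  | nil => rfl
  | cons q qs ih =>
    have hq := hpre q List.mem_cons_self
    match q, hq with
    | [a, b], _ =>
      rw [List.foldl_cons, List.flatMap_cons,
        ih (fun q hmem => hpre q (List.mem_cons_of_mem _ hmem))]
      rfl

lemma insD_fold_spec (xs : List Int) (d : PySem.Dict Int Int) (nid : Int) (s : List Int)
    (hk : d.keys = s) (hn : nid = (s.length : Int))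
    (hg : ∀ x ∈ s, d.get? x = some ((s.idxOf x : Nat) : Int)) :
    (xs.foldl insD (d, nid)).1.keys = PySem.Set.update s xs ∧
    (xs.foldl insD (d, nid)).2 = ((PySem.Set.update s xs).length : Int) ∧
    (∀ x ∈ PySem.Set.update s xs,
      (xs.foldl insD (d, nid)).1.get? x = some (((PySem.Set.update s xs).idxOf x : Nat) : Int)) := by
  induction xs generalizing d nid s with
  | nil => exact ⟨hk, hn, fun x hx => hg x hx⟩
  | cons x xs ih =>
    rw [List.foldl_cons, PySem.Set.update_cons]
    by_cases hmem : x ∈ s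
    · have hc : d.contains x = true := by
        rw [PySem.Dict.contains_iff_mem_keys, hk]; exact hmem
      have hins : insD (d, nid) x = (d, nid) := by simp [insD, hc]
      rw [hins, PySem.Set.add_of_mem hmem]
      exact ih d nid s hk hn hg
    · have hc : d.contains x = false := by
        rw [← Bool.not_eq_true, PySem.Dict.contains_iff_mem_keys, hk]; exact hmem
      have hins : insD (d, nid) x = (d.insert x nid, nid + 1) := by simp [insD, hc]
      rw [hins, PySem.Set.add_of_not_mem hmem]
      refine ih (d.insert x nid) (nid + 1) (s ++ [x]) ?_ ?_ ?_
      · rw [PySem.Dict.keys_insert_of_not_contains d nid hc, hk]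
      · rw [hn]; simp
      · intro y hy
        rcases List.mem_append.mp hy with hys | hyx
        · have hyne : y ≠ x := fun hh => hmem (hh ▸ hys)
          rw [PySem.Dict.get?_insert_of_ne d nid hyne, hg y hys,
            List.idxOf_append, if_pos hys]
        · have hyx' : y = x := by simpa using hyx
          subst hyx'
          rw [PySem.Dict.get?_insert_self, List.idxOf_append, if_neg hmem, hn]
          simp [List.idxOf_cons_self]

lemma buildA_spec (qs : List (List Int)) (hpre : ∀ q ∈ qs, q.length = 2) :
    (buildA qs).1.keys = PySem.Set.ofList (qs.flatMap id) ∧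
    (buildA qs).2 = (((PySem.Set.ofList (qs.flatMap id)).length : Nat) : Int) ∧
    (∀ x ∈ PySem.Set.ofList (qs.flatMap id),
      (buildA qs).1.get? x
        = some (((PySem.Set.ofList (qs.flatMap id)).idxOf x : Nat) : Int)) := by
  have h1 : buildA qs = (qs.flatMap id).foldl insD (PySem.Dict.empty, 0) :=
    buildA_fold qs hpre _
  have h2 := insD_fold_spec (qs.flatMap id) PySem.Dict.empty 0 []
    (by simp) (by simp) (by simp)
  rw [PySem.Set.update_nil_left] at h2
  rw [h1]
  exact h2

-- ---------- the whole query loop, on both sides ----------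

lemma loop_core (qs : List (List Int)) (hpre : ∀ q ∈ qs, q.length = 2)
    (L : List Int) (hL : L = PySem.Set.ofList (qs.flatMap id)) :
    ∀ (R : List (List Int)) (m c : Nat) (uf : UFA) (st : UFB) (φ : Int → Int)
      (out : List Int),
    (∀ q ∈ R, q.length = 2) →
    c + R.length = qs.length →
    L = PySem.Set.update (L.take m) (R.flatMap id) →
    UFInv L m c (qs.length + 1) uf st φ →
    (R.foldl (fun (st : UFA × List Int) q =>
      match q with
      | [a, b] =>
        let uf' := unionA (qs.length + 1) st.1 ((buildA qs).1.getD a 0) ((buildA qs).1.getD b 0)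
        (uf', st.2 ++ [uf'.maxSize])
      | _ => st) (uf, out)).2
    = (R.foldl (fun (st : UFB × List Int) q =>
      match q with
      | [a, b] =>
        let st' := stepB st.1 a b
        (st', st.2 ++ [st'.best])
      | _ => st) (st, out)).2 := by
  have hnd : L.Nodup := hL ▸ PySem.Set.nodup_ofList _
  intro R
  induction R with
  | nil => intro m c uf st φ out _ _ _ _; rfl
  | cons q R ih =>
    intro m c uf st φ out hpreR hcN hupd hrel
    have hq := hpreR q List.mem_cons_self
    match q, hq with
    | [a, b], _ =>
      have hupd' : L = PySem.Set.update (L.take m) (a :: (b :: R.flatMap id)) :=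
        hupd.trans (by rw [List.flatMap_cons]; rfl)
      obtain ⟨m1, φ1, hrel1, hm1, ha1, hupd1⟩ :=
        register_core L hnd m c (qs.length + 1) uf st φ hrel a (b :: R.flatMap id) hupd'
      obtain ⟨m2, φ2, hrel2, hm2, hb2, hupd2⟩ :=
        register_core L hnd m1 c (qs.length + 1) uf (registerB st a) φ1 hrel1 b
          (R.flatMap id) hupd1
      have ha2 : a ∈ L.take m2 := mem_take_mono L m1 m2 hm2 a ha1
      have hF : c + 1 < qs.length + 1 := by simp at hcN; omega
      have haL : a ∈ L := List.take_subset _ _ ha2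
      have hbL : b ∈ L := List.take_subset _ _ hb2
      obtain ⟨hk, hn, hg⟩ := buildA_spec qs hpre
      have hgda : (buildA qs).1.getD a 0 = ((L.idxOf a : Nat) : Int) := by
        refine PySem.Dict.getD_of_get?_eq_some _ 0 ?_
        rw [hL]
        exact hg a (hL ▸ haL)
      have hgdb : (buildA qs).1.getD b 0 = ((L.idxOf b : Nat) : Int) := by
        refine PySem.Dict.getD_of_get?_eq_some _ 0 ?_
        rw [hL]
        exact hg b (hL ▸ hbL)
      have hca2 : (registerB (registerB st a) b).comp.contains a = true := by
        rw [PySem.Dict.contains_iff_mem_keys, hrel2.hkc]; exact ha2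
      have hcb2 : (registerB (registerB st a) b).comp.contains b = true := by
        rw [PySem.Dict.contains_iff_mem_keys, hrel2.hkc]; exact hb2
      have hstepeq : stepB st a b = stepB (registerB (registerB st a) b) a b := by
        simp only [stepB]
        rw [registerB_of_contains _ a hca2, registerB_of_contains _ b hcb2]
      obtain ⟨φ3, hrel3⟩ := union_core L hnd m2 c (qs.length + 1) uf
        (registerB (registerB st a) b) φ2 hrel2 hF a b ha2 hb2
      rw [← hstepeq] at hrel3
      simp only [List.foldl_cons]
      rw [hgda, hgdb, hrel3.hbest]
      exact ih m2 (c+1) _ _ φ3 _ (fun q hmem => hpreR q (List.mem_cons_of_mem _ hmem))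
        (by simp at hcN ⊢; omega) hupd2 hrel3

-- ===== VERDICT (by name: the statement is the Claim_ definition above) =====
theorem maxCircle_spec : Claim_equal_maxCircle := by
  intro qs _hdom hpre
  have hpre' : ∀ q ∈ qs, q.length = 2 := hpre
  show maxCircle qs = maxCircle_alt qs
  obtain ⟨hk, hn, hg⟩ := buildA_spec qs hpre'
  set L : List Int := PySem.Set.ofList (qs.flatMap id) with hLdef
  simp only [maxCircle, maxCircle_alt]
  rw [hn]
  refine loop_core qs hpre' L hLdef qs 0 0 _ _ (fun _ => 0) [] hpre' (by simp) ?_ ?_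
  · rw [List.take_zero, PySem.Set.update_nil_left]
  · refine ⟨?_, ?_, ?_, Nat.zero_le _, ?_, ?_, ?_, ?_, ?_, ?_, ?_, ?_, ?_, ?_, rfl⟩
    · show (PySem.List.pyRange 0 ((L.length : Nat) : Int) 1).length = L.length
      rw [PySem.List.length_pyRange_one]
      omega
    · show (List.replicate ((L.length : Nat) : Int).toNat (0 : Int)).length = L.length
      simp
    · show (List.replicate ((L.length : Nat) : Int).toNat (1 : Int)).length = L.length
      simp
    · intro i hi
      exact absurd hi (not_pvUFS_zero i)
    · intro i h1 h2
      have h0 : (0 : Int) ≤ i := by omega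
      have hiN : i.toNat < L.length := by omega
      refine ⟨?_, ?_, ?_⟩
      · show pvGet (PySem.List.pyRange 0 ((L.length : Nat) : Int) 1) i = i
        rw [pvGet_nonneg _ _ h0, List.getD_eq_getElem _ _
          (by rw [PySem.List.length_pyRange_one]; omega),
          PySem.List.getElem_pyRange_one]
        omega
      · show pvGet (List.replicate ((L.length : Nat) : Int).toNat (0 : Int)) i = 0
        rw [pvGet_nonneg _ _ h0, List.getD_eq_getElem _ _ (by simpa using hiN),
          List.getElem_replicate]
      · show pvGet (List.replicate ((L.length : Nat) : Int).toNat (1 : Int)) i = 1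
        rw [pvGet_nonneg _ _ h0, List.getD_eq_getElem _ _ (by simpa using hiN),
          List.getElem_replicate]
    · intro i hi
      exact absurd hi (not_pvUFS_zero i)
    · intro i hi
      exact absurd hi (not_pvUFS_zero i)
    · simp
    · intro i hi
      exact absurd hi (not_pvUFS_zero i)
    · intro r hr
      exact absurd hr (not_pvUFS_zero r)
    · intro r s hr
      exact absurd hr (not_pvUFS_zero r)
    · intro r hr
      exact absurd hr (not_pvUFS_zero r)
    · intro r hr
      exact absurd hr (not_pvUFS_zero r)
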